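-- pv_equiv track=rewrite | github.com/egorkaagafon/NEURAL-PREDICTION-MARKET | models/pretrained_npm.py | solve_mc_hidden_dim
-- ===== SOURCE A (Python) =====
-- def _head_params(embed_dim: int, hidden_dim: int, num_classes: int,
--                  num_layers: int) -> int:
--     """Exact trainable-param count for a PretrainedClassifierHead."""
--     # LayerNorm(embed_dim): 2 * embed_dim
--     p = 2 * embed_dim
--     # First linear: embed_dim -> hidden_dim
--     p += embed_dim * hidden_dim + hidden_dim
--     # Additional hidden layers: hidden_dim -> hidden_dim
--     for _ in range(num_layers - 1):
--         p += hidden_dim * hidden_dim + hidden_dim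
--     # Output linear: hidden_dim -> num_classes
--     p += hidden_dim * num_classes + num_classes
--     return p
--
-- def solve_mc_hidden_dim(target_params: int, embed_dim: int,
--                         num_classes: int, num_layers: int) -> int:
--     """Find hidden_dim for MC-Dropout (single head) ≈ target_params."""
--     lo, hi = 8, 4096
--     while lo < hi:
--         mid = (lo + hi) // 2
--         if _head_params(embed_dim, mid, num_classes, num_layers) < target_params:
--             lo = mid + 1
--         else:
--             hi = mid
--     best_h, best_diff = lo, float("inf")
--     for h in range(max(8, lo - 2), lo + 3):
--         diff = abs(_head_params(embed_dim, h, num_classes, num_layers) - target_params)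
--         if diff < best_diff:
--             best_diff = diff
--             best_h = h
--     return best_h
-- ===== SOURCE B (Python) =====
-- def _isqrt(n: int) -> int:
--     """Floor square root for 0 <= n < 2**68, by binary expansion of the root."""
--     r = 0
--     bit = 2 ** 33
--     while bit > 0:
--         if (r + bit) * (r + bit) <= n:
--             r = r + bit
--         bit = bit // 2
--     return r
--
--
-- def _poly_params(a: int, b: int, c0: int, h: int) -> int:
--     """Head parameter count as the polynomial a*h^2 + b*h + c0."""
--     return a * h * h + b * h + c0
--
--
-- def solve_mc_hidden_dim(target_params: int, embed_dim: int,
--                         num_classes: int, num_layers: int) -> int: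
--     """Find hidden_dim for MC-Dropout (single head) ~ target_params."""
--     a = num_layers - 1 if num_layers > 1 else 0
--     b = embed_dim + 1 + a + num_classes
--     c0 = 2 * embed_dim + num_classes
--     t1 = target_params - c0
--     if a == 0:
--         hraw = -((-t1) // b)                      # ceil(t1 / b)
--     else:
--         disc = b * b + 4 * a * t1
--         t = 0 if disc <= 0 else _isqrt(disc - 1) + 1   # least t >= 0 with t*t >= disc
--         hraw = -((b - t) // (2 * a))              # ceil((t - b) / (2a))
--     lo = min(4096, max(8, hraw))
--     return min(range(max(8, lo - 2), lo + 3),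
--                key=lambda h: abs(_poly_params(a, b, c0, h) - target_params))
-- ===== Notes on version B (the rewrite author's own statement) =====
-- stated objective: faster
-- what changed: B removes both of A's loops: it views the head parameter count as the quadratic a*h^2+b*h+c0 and inverts it in closed form (hand-written integer square root of the discriminant plus ceiling divisions) instead of running A's O(num_layers)-per-probe bisection loop, then picks the final candidate with min(range, key=...) instead of a best-tracking loop with a float('inf') sentinel; …
-- outside the precondition, e.g. on solve_mc_hidden_dim(175, -14, -2, -2): A returns 4094, B returns 8; on solve_mc_hidden_dim(10, -3, 2, 1): A returns 4094, B raises ZeroDivisionError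
import Mathlib
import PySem

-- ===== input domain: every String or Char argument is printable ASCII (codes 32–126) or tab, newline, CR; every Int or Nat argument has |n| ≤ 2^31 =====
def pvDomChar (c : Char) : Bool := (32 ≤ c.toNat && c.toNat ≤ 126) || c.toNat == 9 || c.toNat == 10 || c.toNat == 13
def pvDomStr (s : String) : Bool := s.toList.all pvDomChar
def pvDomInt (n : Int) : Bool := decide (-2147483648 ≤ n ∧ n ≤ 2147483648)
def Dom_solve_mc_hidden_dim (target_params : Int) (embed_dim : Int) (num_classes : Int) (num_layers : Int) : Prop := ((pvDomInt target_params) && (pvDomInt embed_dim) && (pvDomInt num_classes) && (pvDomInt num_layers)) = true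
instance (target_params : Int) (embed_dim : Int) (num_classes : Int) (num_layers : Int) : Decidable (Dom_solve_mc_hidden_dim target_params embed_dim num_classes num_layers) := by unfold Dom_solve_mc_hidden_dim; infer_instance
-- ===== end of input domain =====

-- B replaces A's two loops (O(num_layers) parameter-count loop inside a bisection loop) by a
-- closed-form quadratic inversion using a hand-written integer square root; objective: faster.

-- ===== PORT A =====
-- _head_params, literal: loop over range(num_layers - 1)
def pv_head_params (embed_dim : Int) (hidden_dim : Int) (num_classes : Int) (num_layers : Int) : Int :=
  let p := 2 * embed_dim
  let p := p + embed_dim * hidden_dim + hidden_dim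
  let p := (PySem.List.pyRange 0 (num_layers - 1) 1).foldl
            (fun p _ => p + (hidden_dim * hidden_dim + hidden_dim)) p
  p + hidden_dim * num_classes + num_classes

-- the while-loop of A's binary search
def pvA_loop (target_params embed_dim num_classes num_layers lo hi : Int) : Int :=
  if h : lo < hi then
    let mid := PySem.Int.floordiv (lo + hi) 2
    if pv_head_params embed_dim mid num_classes num_layers < target_params then
      pvA_loop target_params embed_dim num_classes num_layers (mid + 1) hi
    else
      pvA_loop target_params embed_dim num_classes num_layers lo mid
  else lo
termination_by (hi - lo).toNat
decreasing_by
  · have hf : Int.fdiv (lo + hi) 2 = (lo + hi) / 2 := by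
      rw [Int.fdiv_eq_ediv]; norm_num
    simp only [PySem.Int.floordiv, hf]; omega
  · have hf : Int.fdiv (lo + hi) 2 = (lo + hi) / 2 := by
      rw [Int.fdiv_eq_ediv]; norm_num
    simp only [PySem.Int.floordiv, hf]; omega

def solve_mc_hidden_dim (target_params : Int) (embed_dim : Int) (num_classes : Int) (num_layers : Int) : Int :=
  let lo := pvA_loop target_params embed_dim num_classes num_layers 8 4096
  -- best_diff = float("inf") is modelled as `none` (no finite diff seen yet)
  let r := (PySem.List.pyRange (max 8 (lo - 2)) (lo + 3) 1).foldl
    (fun (st : Int × Option Int) h =>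
      let diff := |pv_head_params embed_dim h num_classes num_layers - target_params|
      match st.2 with
      | none => (h, some diff)
      | some bd => if diff < bd then (h, some diff) else st)
    (lo, none)
  r.1

-- ===== PORT B =====
-- _isqrt's while-loop: binary expansion of the floor square root
def pvIsqrtLoop (n r bit : Int) : Int :=
  if h : bit > 0 then
    pvIsqrtLoop n (if (r + bit) * (r + bit) ≤ n then r + bit else r) (PySem.Int.floordiv bit 2)
  else r
termination_by bit.toNat
decreasing_by
  have hf : Int.fdiv bit 2 = bit / 2 := by
    rw [Int.fdiv_eq_ediv]; norm_num
  simp only [PySem.Int.floordiv, hf]; omega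

def pv_isqrt (n : Int) : Int := pvIsqrtLoop n 0 (2 ^ 33)

def pv_poly_params (a b c0 h : Int) : Int := a * h * h + b * h + c0

def solve_mc_hidden_dim_alt (target_params : Int) (embed_dim : Int) (num_classes : Int) (num_layers : Int) : Int :=
  let a := if num_layers > 1 then num_layers - 1 else 0
  let b := embed_dim + 1 + a + num_classes
  let c0 := 2 * embed_dim + num_classes
  let t1 := target_params - c0
  let hraw :=
    if a = 0 then
      -(PySem.Int.floordiv (-t1) b)
    else
      let disc := b * b + 4 * a * t1
      let t := if disc ≤ 0 then 0 else pv_isqrt (disc - 1) + 1;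
      -(PySem.Int.floordiv (b - t) (2 * a))
  let lo := min 4096 (max 8 hraw)
  (PySem.List.min? (PySem.List.pyRange (max 8 (lo - 2)) (lo + 3) 1)
      (fun h => |pv_poly_params a b c0 h - target_params|)).getD lo

-- ===== PRECONDITION & SPEC =====
-- Pre_ restricts to the natural domain where the head's parameter count is nondecreasing in
-- hidden_dim on [8,4096] (any nonnegative embed_dim/num_classes with num_layers ≥ 1 satisfies it);
-- outside it A's bisection of a non-monotone count returns an accidental path-dependent value.
def Pre_solve_mc_hidden_dim (target_params : Int) (embed_dim : Int) (num_classes : Int) (num_layers : Int) : Prop :=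
  1 ≤ 16 * (if num_layers > 1 then num_layers - 1 else 0)
      + (embed_dim + 1 + (if num_layers > 1 then num_layers - 1 else 0) + num_classes)
instance (target_params : Int) (embed_dim : Int) (num_classes : Int) (num_layers : Int) : Decidable (Pre_solve_mc_hidden_dim target_params embed_dim num_classes num_layers) := by unfold Pre_solve_mc_hidden_dim; infer_instance

def pvWitness_solve_mc_hidden_dim : Int × Int × Int × Int := (1000, 16, 4, 2)

def Spec_solve_mc_hidden_dim (target_params : Int) (embed_dim : Int) (num_classes : Int) (num_layers : Int) (out : Int) : Prop := out = solve_mc_hidden_dim_alt target_params embed_dim num_classes num_layers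
instance (target_params : Int) (embed_dim : Int) (num_classes : Int) (num_layers : Int) (out : Int) : Decidable (Spec_solve_mc_hidden_dim target_params embed_dim num_classes num_layers out) := by unfold Spec_solve_mc_hidden_dim; infer_instance

-- ===== CLAIM (what is proved, stated in full; the proofs are below) =====
def Claim_equal_solve_mc_hidden_dim : Prop := ∀ (target_params : Int) (embed_dim : Int) (num_classes : Int) (num_layers : Int), Dom_solve_mc_hidden_dim target_params embed_dim num_classes num_layers → Pre_solve_mc_hidden_dim target_params embed_dim num_classes num_layers → Spec_solve_mc_hidden_dim target_params embed_dim num_classes num_layers (solve_mc_hidden_dim target_params embed_dim num_classes num_layers)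

-- ===== LEMMAS AND PROOFS =====

-- the per-layer loop adds its constant once per element
theorem pv_foldl_add_const (t : Int) : ∀ (xs : List Int) (init : Int),
    xs.foldl (fun p _ => p + t) init = init + xs.length * t := by
  intro xs
  induction xs with
  | nil => intro init; simp
  | cons x xt ih => intro init; simp [List.foldl, ih]; ring

-- A's parameter count is the quadratic a*h^2 + b*h + c0
theorem pv_head_params_eq (e h c l : Int) :
    pv_head_params e h c l =
      pv_poly_params (if l > 1 then l - 1 else 0)
        (e + 1 + (if l > 1 then l - 1 else 0) + c) (2 * e + c) h := by
  simp only [pv_head_params, pv_poly_params]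
  rw [pv_foldl_add_const (h * h + h) (PySem.List.pyRange 0 (l - 1) 1)]
  rw [PySem.List.length_pyRange_one]
  have hn : ((l - 1 - 0).toNat : Int) = if l > 1 then l - 1 else 0 := by
    split <;> omega
  rw [hn]
  split <;> ring

theorem pv_fdiv_bounds (lo hi : Int) (hlt : lo < hi) :
    lo ≤ PySem.Int.floordiv (lo + hi) 2 ∧ PySem.Int.floordiv (lo + hi) 2 < hi := by
  have hf : PySem.Int.floordiv (lo + hi) 2 = (lo + hi) / 2 := by
    simp only [PySem.Int.floordiv]; rw [Int.fdiv_eq_ediv]; norm_num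
  rw [hf]; omega

-- under Pre_, the count is nondecreasing in hidden_dim on h ≥ 8
theorem pv_mono (a b c0 : Int) (ha : 0 ≤ a) (hb : 1 ≤ 16 * a + b) :
    ∀ x y : Int, 8 ≤ x → x ≤ y → pv_poly_params a b c0 x ≤ pv_poly_params a b c0 y := by
  intro x y hx hxy
  simp only [pv_poly_params]
  nlinarith [mul_nonneg (sub_nonneg.mpr hxy) (by nlinarith : (0:Int) ≤ a * (x + y) + b)]

-- characterization of A's binary-search loop under monotonicity
theorem pvA_loop_char (t e c l : Int)
    (mono : ∀ x y : Int, 8 ≤ x → x ≤ y →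
      pv_head_params e x c l ≤ pv_head_params e y c l) :
    ∀ (n : Nat) (lo hi : Int), (hi - lo).toNat = n → 8 ≤ lo → lo ≤ hi →
      lo ≤ pvA_loop t e c l lo hi ∧ pvA_loop t e c l lo hi ≤ hi ∧
      (∀ x, lo ≤ x → x < pvA_loop t e c l lo hi → pv_head_params e x c l < t) ∧
      (pvA_loop t e c l lo hi < hi → t ≤ pv_head_params e (pvA_loop t e c l lo hi) c l) := by
  intro n
  induction n using Nat.strong_induction_on with
  | _ n ih =>
    intro lo hi hn h8 hlh
    rw [pvA_loop]
    by_cases hlt : lo < hi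
    · rw [dif_pos hlt]
      obtain ⟨h1, h2⟩ := pv_fdiv_bounds lo hi hlt
      set mid := PySem.Int.floordiv (lo + hi) 2 with hmid
      by_cases hc : pv_head_params e mid c l < t
      · rw [if_pos hc]
        obtain ⟨g1, g2, g3, g4⟩ :=
          ih ((hi - (mid + 1)).toNat) (by omega) (mid + 1) hi rfl (by omega) (by omega)
        refine ⟨by omega, g2, ?_, g4⟩
        intro x hx1 hx2
        by_cases hxm : x ≤ mid
        · exact lt_of_le_of_lt (mono x mid (by omega) hxm) hc
        · exact g3 x (by omega) hx2
      · rw [if_neg hc]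
        obtain ⟨g1, g2, g3, g4⟩ :=
          ih ((mid - lo).toNat) (by omega) lo mid rfl h8 h1
        refine ⟨g1, by omega, g3, ?_⟩
        intro _
        by_cases hrm : pvA_loop t e c l lo mid < mid
        · exact g4 hrm
        · have heq : pvA_loop t e c l lo mid = mid := by omega
          rw [heq]; omega
    · rw [dif_neg hlt]
      exact ⟨le_refl lo, by omega, fun x hx1 hx2 => absurd hx2 (by omega),
        fun hh => absurd hh (by omega)⟩

-- the isqrt bit loop computes the floor square root
theorem pv_isqrt_loop_char (n : Int) : ∀ (k : Nat) (r : Int), 0 ≤ r → r * r ≤ n →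
    n < (r + 2 * 2 ^ k) * (r + 2 * 2 ^ k) →
    0 ≤ pvIsqrtLoop n r (2 ^ k) ∧ pvIsqrtLoop n r (2 ^ k) * pvIsqrtLoop n r (2 ^ k) ≤ n ∧
      n < (pvIsqrtLoop n r (2 ^ k) + 1) * (pvIsqrtLoop n r (2 ^ k) + 1) := by
  intro k
  induction k with
  | zero =>
    intro r hr hrn hub
    rw [pvIsqrtLoop, dif_pos (by norm_num : (2:Int) ^ 0 > 0)]
    have hf : PySem.Int.floordiv ((2:Int) ^ 0) 2 = 0 := by
      simp only [PySem.Int.floordiv]; decide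
    rw [hf, pvIsqrtLoop, dif_neg (by norm_num : ¬ (0:Int) > 0)]
    simp only [pow_zero] at hub ⊢
    norm_num at hub
    by_cases hc : (r + 1) * (r + 1) ≤ n
    · rw [if_pos hc]
      exact ⟨by omega, hc, by nlinarith⟩
    · rw [if_neg hc]
      exact ⟨hr, hrn, by omega⟩
  | succ k ihk =>
    intro r hr hrn hub
    have hpos : ((2:Int) ^ (k + 1)) > 0 := by positivity
    rw [pvIsqrtLoop, dif_pos hpos]
    have hf : PySem.Int.floordiv ((2:Int) ^ (k + 1)) 2 = 2 ^ k := by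
      simp only [PySem.Int.floordiv]
      rw [Int.fdiv_eq_ediv, if_pos (Or.inl (by norm_num : (0:Int) ≤ 2)), sub_zero, pow_succ]
      exact Int.mul_ediv_cancel _ (by norm_num)
    rw [hf]
    have h2 : (2:Int) ^ (k + 1) = 2 * 2 ^ k := by rw [pow_succ]; ring
    by_cases hc : (r + 2 ^ (k + 1)) * (r + 2 ^ (k + 1)) ≤ n
    · rw [if_pos hc]
      refine ihk (r + 2 ^ (k + 1)) (by positivity) hc ?_
      have heq : r + 2 ^ (k + 1) + 2 * 2 ^ k = r + 2 * 2 ^ (k + 1) := by rw [h2]; ring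
      rw [heq]; exact hub
    · rw [if_neg hc]
      refine ihk r hr hrn ?_
      have heq : r + 2 * 2 ^ k = r + 2 ^ (k + 1) := by rw [h2]
      rw [heq]; omega

theorem pv_isqrt_char (n : Int) (h0 : 0 ≤ n) (hub : n < 2 ^ 68) :
    0 ≤ pv_isqrt n ∧ pv_isqrt n * pv_isqrt n ≤ n ∧ n < (pv_isqrt n + 1) * (pv_isqrt n + 1) := by
  have h := pv_isqrt_loop_char n 33 0 le_rfl (by simpa using h0) (by norm_num; omega)
  simpa [pv_isqrt] using h

-- the closed form inverts the quadratic: for h ≥ 8, count ≥ target ↔ h ≥ hraw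
theorem pv_hraw_char (T a b c0 : Int) (ha : 0 ≤ a) (hb : 1 ≤ 16 * a + b)
    (hdisc : a ≠ 0 → b * b + 4 * a * (T - c0) - 1 < 2 ^ 68) :
    ∀ x : Int, 8 ≤ x →
      (T ≤ pv_poly_params a b c0 x ↔
        (if a = 0 then
          -(PySem.Int.floordiv (-(T - c0)) b)
        else
          -(PySem.Int.floordiv
              (b - (if b * b + 4 * a * (T - c0) ≤ 0 then 0
                    else pv_isqrt (b * b + 4 * a * (T - c0) - 1) + 1))
              (2 * a))) ≤ x) := by
  intro x hx
  by_cases haz : a = 0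
  · rw [if_pos haz]
    have hbpos : 0 < b := by omega
    have hf : PySem.Int.floordiv (-(T - c0)) b = (-(T - c0)) / b := by
      simp only [PySem.Int.floordiv]
      rw [Int.fdiv_eq_ediv, if_pos (Or.inl (by omega : (0:Int) ≤ _)), sub_zero]
    rw [hf]
    have hswap : -(-(T - c0) / b) ≤ x ↔ -x ≤ -(T - c0) / b := by omega
    rw [hswap, Int.le_ediv_iff_mul_le hbpos]
    simp only [pv_poly_params, haz]
    constructor <;> intro h <;> nlinarith
  · rw [if_neg haz]
    have hapos : 0 < a := lt_of_le_of_ne ha (Ne.symm haz)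
    set disc := b * b + 4 * a * (T - c0) with hdiscdef
    set t : Int := if disc ≤ 0 then 0 else pv_isqrt (disc - 1) + 1 with htdef
    have hu0 : 0 ≤ 2 * a * x + b := by nlinarith
    -- t is the least nonnegative integer whose square reaches disc
    have htsq : disc ≤ (2 * a * x + b) * (2 * a * x + b) ↔ t ≤ 2 * a * x + b := by
      by_cases hd : disc ≤ 0
      · rw [htdef, if_pos hd]
        constructor
        · intro _; exact hu0
        · intro _; nlinarith
      · rw [htdef, if_neg hd]
        obtain ⟨hs0, hs1, hs2⟩ := pv_isqrt_char (disc - 1) (by omega) (by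
          have := hdisc haz; omega)
        set s := pv_isqrt (disc - 1)
        constructor
        · intro hsq
          by_contra hlt
          push_neg at hlt
          have hxs : 2 * a * x + b ≤ s := by omega
          nlinarith
        · intro hts
          nlinarith
    -- the quadratic condition is the discriminant condition
    have hquad : T ≤ pv_poly_params a b c0 x ↔ disc ≤ (2 * a * x + b) * (2 * a * x + b) := by
      simp only [pv_poly_params, hdiscdef]
      constructor <;> intro h <;> nlinarith
    -- the ceiling division turns t ≤ 2ax+b into hraw ≤ x
    have h2a : (0:Int) < 2 * a := by omega
    have hf : PySem.Int.floordiv (b - t) (2 * a) = (b - t) / (2 * a) := by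
      simp only [PySem.Int.floordiv]
      rw [Int.fdiv_eq_ediv, if_pos (Or.inl (by omega : (0:Int) ≤ _)), sub_zero]
    rw [hf]
    have hswap : -((b - t) / (2 * a)) ≤ x ↔ -x ≤ (b - t) / (2 * a) := by omega
    rw [hquad, htsq, hswap, Int.le_ediv_iff_mul_le h2a]
    constructor <;> intro h <;> nlinarith

-- named step functions (proof-only): the min?-fold step and A's best-tracking step
def pvMinStep (key : Int → Int) (acc : Option Int) (y : Int) : Option Int :=
  match acc with
  | none => some y
  | some mm => if key y < key mm then some y else some mm

def pvBestStep (key : Int → Int) (st : Int × Option Int) (h : Int) : Int × Option Int :=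
  match st.2 with
  | none => (h, some (key h))
  | some bd => if key h < bd then (h, some (key h)) else st

theorem pv_min?_eq_fold (xs : List Int) (key : Int → Int) :
    PySem.List.min? xs key = xs.foldl (pvMinStep key) none := by
  simp only [PySem.List.min?]
  exact List.foldl_ext _ _ _ (fun acc y _ => by cases acc <;> rfl)

-- once a finite best_diff is present, A's fold tracks the first minimum and its key
theorem pv_scan_eq (key : Int → Int) : ∀ (xs : List Int) (m r : Int),
    xs.foldl (pvMinStep key) (some m) = some r →
    xs.foldl (pvBestStep key) (m, some (key m)) = (r, some (key r)) := by
  intro xs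
  induction xs with
  | nil => intro m r hr; simp at hr; simp [hr]
  | cons x xt ih =>
    intro m r hr
    simp only [List.foldl, pvMinStep, pvBestStep] at hr ⊢
    by_cases hx : key x < key m
    · simp only [hx, if_pos] at hr ⊢; exact ih x r hr
    · simp only [hx, if_false] at hr ⊢; exact ih m r hr

theorem pv_min_isSome (key : Int → Int) : ∀ (xs : List Int) (m : Int),
    ∃ r, xs.foldl (pvMinStep key) (some m) = some r := by
  intro xs
  induction xs with
  | nil => intro m; exact ⟨m, rfl⟩
  | cons x xt ih =>
    intro m
    simp only [List.foldl, pvMinStep]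
    by_cases hx : key x < key m
    · simp only [hx, if_pos]; exact ih x
    · simp only [hx, if_false]; exact ih m

-- A's sentinel-tracking candidate fold computes the first minimum by key, with `lo` an unused default
theorem pv_pick_eq (key : Int → Int) (xs : List Int) (lo : Int) :
    (xs.foldl (pvBestStep key) (lo, none)).1 = (PySem.List.min? xs key).getD lo := by
  rw [pv_min?_eq_fold]
  cases xs with
  | nil => rfl
  | cons x xt =>
    simp only [List.foldl, pvMinStep, pvBestStep]
    obtain ⟨r, hr⟩ := pv_min_isSome key xt x
    rw [hr, pv_scan_eq key xt x r hr]
    rfl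

-- B's clamped closed-form lower bound coincides with A's bisection result
theorem pv_lo_eq (t e c l : Int)
    (hdom : Dom_solve_mc_hidden_dim t e c l) (hpre : Pre_solve_mc_hidden_dim t e c l) :
    pvA_loop t e c l 8 4096 =
      min 4096 (max 8
        (if (if l > 1 then l - 1 else 0) = 0 then
          -(PySem.Int.floordiv (-(t - (2 * e + c))) (e + 1 + (if l > 1 then l - 1 else 0) + c))
        else
          -(PySem.Int.floordiv
              ((e + 1 + (if l > 1 then l - 1 else 0) + c) -
                (if (e + 1 + (if l > 1 then l - 1 else 0) + c) *
                      (e + 1 + (if l > 1 then l - 1 else 0) + c) +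
                      4 * (if l > 1 then l - 1 else 0) * (t - (2 * e + c)) ≤ 0 then 0
                 else pv_isqrt ((e + 1 + (if l > 1 then l - 1 else 0) + c) *
                      (e + 1 + (if l > 1 then l - 1 else 0) + c) +
                      4 * (if l > 1 then l - 1 else 0) * (t - (2 * e + c)) - 1) + 1))
              (2 * (if l > 1 then l - 1 else 0))))) := by
  -- Dom bounds, for the isqrt range
  simp only [Dom_solve_mc_hidden_dim, pvDomInt, Bool.and_eq_true, decide_eq_true_eq] at hdom
  obtain ⟨⟨⟨hdt, hde⟩, hdc⟩, hdl⟩ := hdom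
  unfold Pre_solve_mc_hidden_dim at hpre
  set a : Int := if l > 1 then l - 1 else 0 with hadef
  set b : Int := e + 1 + a + c with hbdef
  have ha : 0 ≤ a := by rw [hadef]; split <;> omega
  have haM : a ≤ 2147483648 := by rw [hadef]; split <;> omega
  have hb : 1 ≤ 16 * a + b := hpre
  have hbM : b * b ≤ 6442450946 * 6442450946 := by nlinarith
  have hdisc : a ≠ 0 → b * b + 4 * a * (t - (2 * e + c)) - 1 < 2 ^ 68 := by
    intro _
    have h1 : t - (2 * e + c) ≤ 8589934592 := by omega
    have h2 : 4 * a * (t - (2 * e + c)) ≤ 4 * 2147483648 * 8589934592 := by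
      nlinarith [mul_nonneg ha (show (0:Int) ≤ 8589934592 - (t - (2 * e + c)) by omega),
        mul_nonneg (show (0:Int) ≤ 2147483648 - a by omega) (show (0:Int) ≤ 8589934592 by norm_num)]
    have h68 : (2:Int) ^ 68 = 295147905179352825856 := by norm_num
    linarith
  have hiff := pv_hraw_char t a b (2 * e + c) ha hb hdisc
  set hraw : Int :=
    (if a = 0 then
      -(PySem.Int.floordiv (-(t - (2 * e + c))) b)
    else
      -(PySem.Int.floordiv
          (b - (if b * b + 4 * a * (t - (2 * e + c)) ≤ 0 then 0
                else pv_isqrt (b * b + 4 * a * (t - (2 * e + c)) - 1) + 1))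
          (2 * a))) with hrawdef
  -- A's count as the quadratic
  have hpe : ∀ x : Int, pv_head_params e x c l = pv_poly_params a b (2 * e + c) x := by
    intro x
    rw [hbdef, hadef]
    exact pv_head_params_eq e x c l
  have hiff' : ∀ x : Int, 8 ≤ x → (t ≤ pv_head_params e x c l ↔ hraw ≤ x) := by
    intro x hx
    rw [hpe x]
    exact hiff x hx
  -- A's loop characterization
  have mono : ∀ x y : Int, 8 ≤ x → x ≤ y →
      pv_head_params e x c l ≤ pv_head_params e y c l := by
    intro x y hx hxy
    rw [hpe x, hpe y]
    exact pv_mono a b (2 * e + c) ha hb x y hx hxy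
  obtain ⟨g1, g2, g3, g4⟩ := pvA_loop_char t e c l mono ((4096 - 8 : Int)).toNat 8 4096 rfl
    (by norm_num) (by norm_num)
  set rA := pvA_loop t e c l 8 4096
  set rB : Int := min 4096 (max 8 hraw) with hrBdef
  -- rA = rB by the shared characterization
  rcases lt_trichotomy rA rB with hlt | heq | hgt
  · exfalso
    have hrB1 : rB ≤ 4096 := by omega
    have hfA : t ≤ pv_head_params e rA c l := g4 (by omega)
    have hrA8 : 8 ≤ rA := g1
    -- rA < rB ≤ max 8 hraw, and 8 ≤ rA, so rA < hraw
    have hrAh : rA < hraw := by omega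
    have hcontr := (hiff' rA hrA8).mp hfA
    omega
  · exact heq
  · exfalso
    -- rB < rA ≤ 4096, so rB < 4096, hence hraw ≤ rB
    have hrB4096 : rB < 4096 := by omega
    have hrB8 : 8 ≤ rB := by omega
    have hrBh : hraw ≤ rB := by omega
    have hfB : t ≤ pv_head_params e rB c l := (hiff' rB hrB8).mpr hrBh
    have hlt2 := g3 rB hrB8 hgt
    omega

theorem solve_eq (t e c l : Int)
    (hdom : Dom_solve_mc_hidden_dim t e c l) (hpre : Pre_solve_mc_hidden_dim t e c l) :
    solve_mc_hidden_dim t e c l = solve_mc_hidden_dim_alt t e c l := by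
  unfold solve_mc_hidden_dim solve_mc_hidden_dim_alt
  rw [pv_lo_eq t e c l hdom hpre]
  simp only [pv_head_params_eq]
  refine Eq.trans (congrArg Prod.fst
      (List.foldl_ext _ (pvBestStep (fun h =>
        |pv_poly_params (if l > 1 then l - 1 else 0)
          (e + 1 + (if l > 1 then l - 1 else 0) + c) (2 * e + c) h - t|)) _
        (fun st y _ => ?_)))
    (pv_pick_eq _ _ _)
  rcases st with ⟨a, _ | bd⟩ <;> rfl

-- ===== VERDICT (by name: the statement is the Claim_ definition above) =====
theorem solve_mc_hidden_dim_spec : Claim_equal_solve_mc_hidden_dim := by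
  intro t e c l hdom hpre
  unfold Spec_solve_mc_hidden_dim
  exact solve_eq t e c l hdom hpre
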